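-- pv_equiv track=rewrite | github.com/miracle173/math-posts | stackexchange/math/minimal_invalid_sudoku/source/simple_sudoku.py | restrictedGrowthSequencePermutation
-- ===== SOURCE A (Python) =====
-- def restrictedGrowthSequencePermutation(aSequence):
--     '''
--     purpose:
--         replace the values of the symbols
--         so that the resulting sequence is a
--         restricted groth sequence
--     '''
--     mySymbolPermutation=[0]*10
--     # myPermutation[0]==0 for technical reasons
--     # this value is not used
--     # the myNewSequence is not used, we keep it to document its creation
--
--     nextValue=1
--     myNewSequence=[]
--     for value in aSequence:
--         if mySymbolPermutation[value]==0:
--             mySymbolPermutation[value]=nextValue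
--             nextValue+=1
--         myNewSequence.append(mySymbolPermutation[value])
--     for i in range(10):
--         if i==0:
--             mySymbolPermutation[i]=i
--     return mySymbolPermutation
-- ===== SOURCE B (Python) =====
-- def restrictedGrowthSequencePermutation(aSequence):
--     # per-symbol closed form: the label of a symbol is the number of distinct
--     # symbols in the prefix up to and including its first occurrence
--     perm = [0] * 10
--     for v in set(aSequence):
--         perm[v] = len(set(aSequence[:aSequence.index(v) + 1]))
--     perm[0] = 0
--     return perm
-- ===== Notes on version B (the rewrite author's own statement) =====
-- stated objective: alternative
-- what changed: Replaced A's sequential counter-carrying pass (assign nextValue at each unseen symbol, increment) by a per-symbol closed form with no counter and no sequential dependency: for each symbol v of set(aSequence), its label is computed independently as the number of distinct symbols in the prefix up to and including v's first occurrence; slot 0 is then reset as A's trailing loop does.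
-- outside the precondition, e.g. on restrictedGrowthSequencePermutation([9, -1]): A returns [0, 0, 0, 0, 0, 0, 0, 0, 0, 1], B returns [0, 0, 0, 0, 0, 0, 0, 0, 0, 2]
import Mathlib
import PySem

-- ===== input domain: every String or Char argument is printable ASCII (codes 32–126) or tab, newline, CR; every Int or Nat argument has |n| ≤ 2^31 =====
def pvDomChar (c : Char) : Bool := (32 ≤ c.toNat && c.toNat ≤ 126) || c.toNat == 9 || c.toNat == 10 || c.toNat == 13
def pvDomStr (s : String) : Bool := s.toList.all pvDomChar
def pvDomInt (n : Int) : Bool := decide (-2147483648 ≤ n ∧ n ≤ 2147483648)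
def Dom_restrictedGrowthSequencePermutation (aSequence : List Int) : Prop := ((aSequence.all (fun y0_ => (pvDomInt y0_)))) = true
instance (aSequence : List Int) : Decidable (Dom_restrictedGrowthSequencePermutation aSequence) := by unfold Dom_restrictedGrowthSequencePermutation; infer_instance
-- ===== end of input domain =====

-- B replaces A's sequential counter-carrying pass by a per-symbol closed form: each symbol's
-- label is computed independently as the number of distinct symbols up to its first occurrence;
-- objective: alternative.

-- ===== PORT A =====
def restrictedGrowthSequencePermutation (aSequence : List Int) : List Int :=
  -- mySymbolPermutation=[0]*10; nextValue=1; myNewSequence=[]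
  let st := aSequence.foldl (fun (st : List Int × Int × List Int) value =>
      -- if mySymbolPermutation[value]==0: set it to nextValue; nextValue+=1
      let st :=
        if PySem.List.pyGetD st.1 value 0 = 0 then
          (PySem.List.pySetD st.1 value st.2.1, st.2.1 + 1, st.2.2)
        else st
      -- myNewSequence.append(mySymbolPermutation[value])
      (st.1, st.2.1, st.2.2 ++ [PySem.List.pyGetD st.1 value 0]))
    (List.replicate 10 (0 : Int), 1, [])
  -- for i in range(10): if i==0: mySymbolPermutation[i]=i
  (PySem.List.pyRange 0 10 1).foldl
    (fun p i => if i = 0 then PySem.List.pySetD p i i else p) st.1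

-- ===== PORT B =====
def restrictedGrowthSequencePermutation_alt (aSequence : List Int) : List Int :=
  -- perm = [0]*10; for v in set(aSequence): perm[v] = len(set(aSequence[:aSequence.index(v)+1]))
  let perm := (PySem.Set.ofList aSequence).foldl
    (fun p v =>
      match PySem.List.index? aSequence v with
      | some i =>
          PySem.List.pySetD p v
            (((PySem.Set.ofList
                (PySem.List.slice aSequence none (some ((i : Int) + 1)))).length : Int))
      | none => p)  -- unreachable: every v of set(aSequence) occurs in aSequence
    (List.replicate 10 (0 : Int))
  -- perm[0] = 0
  PySem.List.pySetD perm 0 0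

-- ===== PRECONDITION & SPEC =====
-- Pre_ excludes sequences with a symbol outside -10..9, on which A raises IndexError, and
-- sequences containing two distinct symbols congruent mod 10, on which Python's accidental
-- negative-index wraparound makes A alias them through one slot while B's writes for the two
-- distinct set elements collide in an iteration-order-dependent way.
def Pre_restrictedGrowthSequencePermutation (aSequence : List Int) : Prop :=
  (∀ v ∈ aSequence, -10 ≤ v ∧ v ≤ 9) ∧
  ∀ v ∈ aSequence, ∀ w ∈ aSequence, v.emod 10 = w.emod 10 → v = w
instance (aSequence : List Int) : Decidable (Pre_restrictedGrowthSequencePermutation aSequence) := by unfold Pre_restrictedGrowthSequencePermutation; infer_instance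
def pvWitness_restrictedGrowthSequencePermutation : List Int := [3, 1, 3, 0, -1]

def Spec_restrictedGrowthSequencePermutation (aSequence : List Int) (out : List Int) : Prop := out = restrictedGrowthSequencePermutation_alt aSequence
instance (aSequence : List Int) (out : List Int) : Decidable (Spec_restrictedGrowthSequencePermutation aSequence out) := by unfold Spec_restrictedGrowthSequencePermutation; infer_instance

-- ===== CLAIM (what is proved, stated in full; the proofs are below) =====
def Claim_equal_restrictedGrowthSequencePermutation : Prop := ∀ (aSequence : List Int), Dom_restrictedGrowthSequencePermutation aSequence → Pre_restrictedGrowthSequencePermutation aSequence → Spec_restrictedGrowthSequencePermutation aSequence (restrictedGrowthSequencePermutation aSequence)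

-- ===== LEMMAS AND PROOFS =====

-- sequential labelling pass: perm[v] = i for the symbols in order, i counting up
def pvTb (perm : List Int) (i : Int) (seen : List Int) : List Int :=
  match seen with
  | [] => perm
  | v :: rest => pvTb (PySem.List.pySetD perm v i) (i + 1) rest

theorem pvTb_append (seen : List Int) : ∀ (perm : List Int) (i : Int) (v : Int),
    pvTb perm i (seen ++ [v]) = PySem.List.pySetD (pvTb perm i seen) v (i + seen.length) := by
  induction seen with
  | nil => intro perm i v; simp [pvTb]
  | cons u rest ih =>
      intro perm i v
      simp only [List.cons_append, pvTb, ih, List.length_cons]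
      congr 1
      push_cast; ring

theorem pv_get_set_ne (xs : List Int) (u v x : Int) (hu0 : 0 ≤ u)
    (hu1 : u < (xs.length : Int)) (hv0 : 0 ≤ v) (hne : v ≠ u) :
    PySem.List.pyGetD (PySem.List.pySetD xs u x) v 0 = PySem.List.pyGetD xs v 0 := by
  rw [show u = ((u.toNat : Nat) : Int) from by omega,
      show v = ((v.toNat : Nat) : Int) from by omega,
      PySem.List.pyGetD_pySetD_natCast xs u.toNat v.toNat x 0 (by omega),
      if_neg (by omega)]

theorem pv_get_set_self (xs : List Int) (u x : Int) (hu0 : 0 ≤ u)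
    (hu1 : u < (xs.length : Int)) :
    PySem.List.pyGetD (PySem.List.pySetD xs u x) u 0 = x := by
  rw [show u = ((u.toNat : Nat) : Int) from by omega,
      PySem.List.pyGetD_pySetD_natCast xs u.toNat u.toNat x 0 (by omega),
      if_pos rfl]

theorem pvTb_get_notmem (seen : List Int) : ∀ (perm : List Int) (i v : Int),
    v ∉ seen → 0 ≤ v → (∀ u ∈ seen, 0 ≤ u ∧ u < perm.length) →
    PySem.List.pyGetD (pvTb perm i seen) v 0 = PySem.List.pyGetD perm v 0 := by
  induction seen with
  | nil => intro perm i v _ _ _; rfl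
  | cons u rest ih =>
      intro perm i v hv hv0 hb
      have hu := hb u (by simp)
      simp only [pvTb]
      rw [ih _ _ _ (by simp at hv; exact hv.2) hv0
            (by intro w hw; simpa [PySem.List.length_pySetD] using hb w (by simp [hw]))]
      exact pv_get_set_ne _ _ _ _ hu.1 hu.2 hv0 (by simp at hv; exact fun h => hv.1 h)

theorem pvTb_get_mem (seen : List Int) : ∀ (perm : List Int) (i v : Int),
    v ∈ seen → seen.Nodup → (∀ u ∈ seen, 0 ≤ u ∧ u < perm.length) →
    ∃ k : Nat, PySem.List.pyGetD (pvTb perm i seen) v 0 = i + k := by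
  induction seen with
  | nil => intro _ _ _ h; exact absurd h (by simp)
  | cons u rest ih =>
      intro perm i v hv hnd hb
      have hu := hb u (by simp)
      simp only [pvTb]
      by_cases hvr : v ∈ rest
      · obtain ⟨k, hk⟩ := ih (PySem.List.pySetD perm u i) (i + 1) v hvr
          (List.Nodup.of_cons hnd)
          (by intro w hw; simpa [PySem.List.length_pySetD] using hb w (by simp [hw]))
        exact ⟨k + 1, by rw [hk]; push_cast; ring⟩
      · have hvu : v = u := by simp at hv; tauto
        subst hvu
        rw [pvTb_get_notmem rest _ _ _ hvr hu.1
              (by intro w hw; simpa [PySem.List.length_pySetD] using hb w (by simp [hw]))]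
        exact ⟨0, by rw [pv_get_set_self _ _ _ hu.1 hu.2]; simp⟩

theorem pvA_loop (xs : List Int) : ∀ (seen ns : List Int),
    (∀ v ∈ xs, 0 ≤ v ∧ v ≤ 9) → (∀ v ∈ seen, 0 ≤ v ∧ v ≤ 9) → seen.Nodup →
    ∃ ns', xs.foldl (fun (st : List Int × Int × List Int) value =>
        let st :=
          if PySem.List.pyGetD st.1 value 0 = 0 then
            (PySem.List.pySetD st.1 value st.2.1, st.2.1 + 1, st.2.2)
          else st
        (st.1, st.2.1, st.2.2 ++ [PySem.List.pyGetD st.1 value 0]))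
      (pvTb (List.replicate 10 (0 : Int)) 1 seen, (seen.length : Int) + 1, ns)
    = (pvTb (List.replicate 10 (0 : Int)) 1 (xs.foldl PySem.Set.add seen),
       ((xs.foldl PySem.Set.add seen).length : Int) + 1, ns') := by
  induction xs with
  | nil => intro seen ns _ _ _; exact ⟨ns, rfl⟩
  | cons v rest ih =>
      intro seen ns hxs hseen hnd
      have hv := hxs v (by simp)
      have hlen : ∀ u ∈ seen, 0 ≤ u ∧ u < ((List.replicate 10 (0 : Int)).length : Int) := by
        intro u hu; have := hseen u hu; simp; omega
      simp only [List.foldl_cons]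
      by_cases hmem : v ∈ seen
      · obtain ⟨k, hk⟩ := pvTb_get_mem seen (List.replicate 10 (0 : Int)) 1 v hmem hnd hlen
        have hne : ¬ PySem.List.pyGetD (pvTb (List.replicate 10 (0 : Int)) 1 seen) v 0 = 0 := by
          rw [hk]; omega
        have hadd : PySem.Set.add seen v = seen := by
          simp [PySem.Set.add, List.contains_eq_mem, hmem]
        rw [if_neg hne, hadd]
        exact ih seen _ (fun u hu => hxs u (by simp [hu])) hseen hnd
      · have h0 : PySem.List.pyGetD (pvTb (List.replicate 10 (0 : Int)) 1 seen) v 0 = 0 := by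
          rw [pvTb_get_notmem seen _ _ _ hmem hv.1 hlen]
          rw [show v = ((v.toNat : Nat) : Int) from by omega, PySem.List.pyGetD_natCast,
              List.getD_eq_getElem?_getD, List.getElem?_replicate]
          split <;> rfl
        have hadd : PySem.Set.add seen v = seen ++ [v] := by
          simp [PySem.Set.add, List.contains_eq_mem, hmem]
        rw [if_pos h0, hadd]
        have hset : PySem.List.pySetD (pvTb (List.replicate 10 (0 : Int)) 1 seen) v ((seen.length : Int) + 1)
            = pvTb (List.replicate 10 (0 : Int)) 1 (seen ++ [v]) := by
          rw [pvTb_append]; congr 1; ring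
        have hlen2 : ((seen ++ [v]).length : Int) + 1 = (seen.length : Int) + 1 + 1 := by
          simp only [List.length_append, List.length_cons, List.length_nil]
          push_cast
          ring
        rw [hset]
        obtain ⟨ns', h⟩ := ih (seen ++ [v]) (ns ++ [PySem.List.pyGetD (pvTb (List.replicate 10 (0 : Int)) 1 (seen ++ [v])) v 0])
          (fun u hu => hxs u (by simp [hu]))
          (by intro u hu; rcases List.mem_append.1 hu with h1 | h1
              · exact hseen u h1
              · rw [List.mem_singleton] at h1; subst h1; exact hv)
          (by rw [List.nodup_append]
              exact ⟨hnd, List.nodup_singleton v,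
                fun a ha b hb => by
                  rw [List.mem_singleton] at hb; subst hb
                  exact fun he => hmem (he ▸ ha)⟩)
        refine ⟨ns', ?_⟩
        rw [← h, ← hlen2]

-- the trailing range(10) loop of A only resets index 0
theorem pvA_resetLoop (p : List Int) :
    (PySem.List.pyRange 0 10 1).foldl
      (fun p i => if i = 0 then PySem.List.pySetD p i i else p) p
    = PySem.List.pySetD p 0 0 := by
  have h : PySem.List.pyRange 0 10 1 = [0,1,2,3,4,5,6,7,8,9] := by decide
  rw [h]
  norm_num [List.foldl]

-- characterization of A on sequences whose symbols already lie in 0..9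
theorem pvA_char (xs : List Int) (hpre : ∀ v ∈ xs, 0 ≤ v ∧ v ≤ 9) :
    restrictedGrowthSequencePermutation xs
      = PySem.List.pySetD (pvTb (List.replicate 10 (0 : Int)) 1 (PySem.Set.ofList xs)) 0 0 := by
  obtain ⟨ns', h⟩ := pvA_loop xs [] [] hpre (by simp) (by simp)
  simp only [pvTb, List.length_nil, Nat.cast_zero, zero_add] at h
  simp only [restrictedGrowthSequencePermutation]
  rw [h, pvA_resetLoop]
  rw [PySem.Set.ofList_eq_foldl]

-- Python's negative-index wraparound: an index in -10..9 of a 10-element list behaves like its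
-- residue mod 10
theorem pv_idx_wrap (i : Int) (h1 : -10 ≤ i) (h2 : i < 10) :
    PySem.List.pyIdx? 10 i = PySem.List.pyIdx? 10 (i.emod 10) := by
  unfold PySem.List.pyIdx?
  have e0 : 0 ≤ i.emod 10 := Int.emod_nonneg i (by norm_num)
  have e1 : i.emod 10 < 10 := Int.emod_lt_of_pos i (by norm_num)
  have e2 : i.emod 10 = if 0 ≤ i then i else i + 10 := by
    split_ifs with h
    · exact Int.emod_eq_of_lt h h2
    · have h3 : (i + 10) % (10 : Int) = i % 10 := by
        simpa using Int.add_mul_emod_self_left i 10 1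
      have h4 : (i + 10).emod 10 = i + 10 := Int.emod_eq_of_lt (by omega) (by omega)
      exact h3.symm.trans h4
  split_ifs <;> first | rfl | omega | (exfalso; omega) | (congr 1; omega)

theorem pv_setD_wrap (xs : List Int) (hlen : xs.length = 10) (i : Int)
    (h1 : -10 ≤ i) (h2 : i < 10) (v : Int) :
    PySem.List.pySetD xs i v = PySem.List.pySetD xs (i.emod 10) v := by
  simp only [PySem.List.pySetD, PySem.List.pySet?, hlen, pv_idx_wrap i h1 h2]

theorem pv_getD_wrap (xs : List Int) (hlen : xs.length = 10) (i : Int)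
    (h1 : -10 ≤ i) (h2 : i < 10) (d : Int) :
    PySem.List.pyGetD xs i d = PySem.List.pyGetD xs (i.emod 10) d := by
  simp only [PySem.List.pyGetD, PySem.List.pyGet?, hlen, pv_idx_wrap i h1 h2]

-- A's loop is invariant under replacing each symbol by its residue mod 10
theorem pvA_loop_norm (xs : List Int) : ∀ (st : List Int × Int × List Int),
    st.1.length = 10 → (∀ v ∈ xs, -10 ≤ v ∧ v ≤ 9) →
    xs.foldl (fun (st : List Int × Int × List Int) value =>
        let st :=
          if PySem.List.pyGetD st.1 value 0 = 0 then
            (PySem.List.pySetD st.1 value st.2.1, st.2.1 + 1, st.2.2)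
          else st
        (st.1, st.2.1, st.2.2 ++ [PySem.List.pyGetD st.1 value 0])) st
    = (xs.map (fun v => v.emod 10)).foldl (fun (st : List Int × Int × List Int) value =>
        let st :=
          if PySem.List.pyGetD st.1 value 0 = 0 then
            (PySem.List.pySetD st.1 value st.2.1, st.2.1 + 1, st.2.2)
          else st
        (st.1, st.2.1, st.2.2 ++ [PySem.List.pyGetD st.1 value 0])) st := by
  induction xs with
  | nil => intro st _ _; rfl
  | cons v rest ih =>
      intro st hlen hb
      have hv := hb v (by simp)
      have g1 := pv_getD_wrap st.1 hlen v hv.1 (by omega) 0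
      have s1 := pv_setD_wrap st.1 hlen v hv.1 (by omega) st.2.1
      have g2 := pv_getD_wrap (PySem.List.pySetD st.1 (v.emod 10) st.2.1)
        (by rw [PySem.List.length_pySetD]; exact hlen) v hv.1 (by omega) 0
      simp only [List.map_cons, List.foldl_cons]
      by_cases h0 : PySem.List.pyGetD st.1 v 0 = 0
      · have h0' : PySem.List.pyGetD st.1 (v.emod 10) 0 = 0 := g1 ▸ h0
        rw [if_pos h0, if_pos h0', s1, g2]
        exact ih _ (by simp [PySem.List.length_pySetD, hlen]) (fun u hu => hb u (by simp [hu]))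
      · have h0' : ¬ PySem.List.pyGetD st.1 (v.emod 10) 0 = 0 := g1 ▸ h0
        rw [if_neg h0, if_neg h0', g1]
        exact ih _ hlen (fun u hu => hb u (by simp [hu]))

theorem pvA_norm (xs : List Int) (hb : ∀ v ∈ xs, -10 ≤ v ∧ v ≤ 9) :
    restrictedGrowthSequencePermutation xs
      = restrictedGrowthSequencePermutation (xs.map (fun v => v.emod 10)) := by
  simp only [restrictedGrowthSequencePermutation]
  rw [pvA_loop_norm xs _ (by simp) hb]

-- ordered dedup is invariant (elementwise) under the residue map when no two distinct
-- symbols share a residue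
theorem pv_add_map (s : List Int) (v : Int)
    (hinj : ∀ w ∈ s, v.emod 10 = w.emod 10 → v = w) :
    PySem.Set.add (s.map (fun v => v.emod 10)) (v.emod 10)
      = (PySem.Set.add s v).map (fun v => v.emod 10) := by
  simp only [PySem.Set.add]
  by_cases hm : v ∈ s
  · simp [hm, List.mem_map.2 ⟨v, hm, rfl⟩]
  · have hnm : (v.emod 10) ∉ s.map (fun v => v.emod 10) := by
      intro h
      obtain ⟨w, hw, he⟩ := List.mem_map.1 h
      exact hm ((hinj w hw he.symm) ▸ hw)
    simp [hm, hnm]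

theorem pv_mem_add (s : List Int) (v w : Int) (h : w ∈ PySem.Set.add s v) : w ∈ s ∨ w = v := by
  simp only [PySem.Set.add] at h
  split at h
  · exact Or.inl h
  · rcases List.mem_append.1 h with h1 | h1
    · exact Or.inl h1
    · exact Or.inr (List.mem_singleton.mp h1)

theorem pv_ofList_map (xs : List Int) : ∀ s : List Int,
    (∀ v ∈ s ++ xs, ∀ w ∈ s ++ xs, v.emod 10 = w.emod 10 → v = w) →
    List.foldl PySem.Set.add (s.map (fun v => v.emod 10)) (xs.map (fun v => v.emod 10))
      = (List.foldl PySem.Set.add s xs).map (fun v => v.emod 10) := by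
  induction xs with
  | nil => intro s _; rfl
  | cons v rest ih =>
      intro s hinj
      simp only [List.map_cons, List.foldl_cons]
      rw [pv_add_map s v (fun w hw => hinj v (by simp) w (by simp [hw]))]
      apply ih
      intro a ha b hb
      have sub : ∀ c, c ∈ PySem.Set.add s v ++ rest → c ∈ s ++ v :: rest := by
        intro c hc
        rcases List.mem_append.1 hc with h1 | h1
        · rcases pv_mem_add s v c h1 with h2 | h2
          · exact List.mem_append.2 (Or.inl h2)
          · exact List.mem_append.2 (Or.inr (by simp [h2]))
        · exact List.mem_append.2 (Or.inr (by simp [h1]))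
      exact hinj a (sub a ha) b (sub b hb)

-- the sequential labelling pass is invariant under the residue map
theorem pvTb_map (u : List Int) : ∀ (p : List Int) (i : Int), p.length = 10 →
    (∀ v ∈ u, -10 ≤ v ∧ v ≤ 9) →
    pvTb p i (u.map (fun v => v.emod 10)) = pvTb p i u := by
  induction u with
  | nil => intro p i _ _; rfl
  | cons v rest ih =>
      intro p i hlen hb
      have hv := hb v (by simp)
      simp only [List.map_cons, pvTb]
      rw [← pv_setD_wrap p hlen v hv.1 (by omega) i]
      exact ih _ _ (by simp [PySem.List.length_pySetD, hlen]) (fun u hu => hb u (by simp [hu]))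

-- ===== B-side lemmas =====

-- folding Set.add only appends
theorem pv_foldl_add_prefix (xs : List Int) : ∀ s : List Int,
    ∃ t, List.foldl PySem.Set.add s xs = s ++ t := by
  induction xs with
  | nil => intro s; exact ⟨[], by simp⟩
  | cons v rest ih =>
      intro s
      simp only [List.foldl_cons, PySem.Set.add]
      split
      · exact ih s
      · obtain ⟨t, ht⟩ := ih (s ++ [v])
        exact ⟨[v] ++ t, by rw [ht, List.append_assoc]⟩

-- the number of distinct symbols up to and including the first occurrence of v is one more
-- than v's position in the ordered dedup
theorem pv_prefix_count (xs : List Int) : ∀ (s : List Int) (v : Int) (i k : Nat),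
    v ∉ s →
    PySem.List.index? xs v = some i →
    PySem.List.index? (List.foldl PySem.Set.add s xs) v = some k →
    (List.foldl PySem.Set.add s (xs.take (i + 1))).length = k + 1 := by
  induction xs with
  | nil =>
      intro s v i k _ hi _
      rw [PySem.List.index?_eq_idxOf?] at hi
      simp at hi
  | cons u rest ih =>
      intro s v i k hvs hi hk
      by_cases huv : u = v
      · subst huv
        rw [PySem.List.index?_cons_self] at hi
        injection hi with hi; subst hi
        have hadd : PySem.Set.add s u = s ++ [u] := by
          simp [PySem.Set.add, List.contains_eq_mem, hvs]
        obtain ⟨t, ht⟩ := pv_foldl_add_prefix rest (s ++ [u])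
        rw [List.foldl_cons, hadd, ht] at hk
        rw [PySem.List.index?_append_of_mem (l := s ++ [u]) t (by simp)] at hk
        rw [PySem.List.index?_append_singleton_self s u hvs] at hk
        injection hk with hk
        simp [List.take, List.foldl_cons, hadd, ← hk]
      · rw [PySem.List.index?_cons_of_ne rest huv] at hi
        cases hrest : PySem.List.index? rest v with
        | none => rw [hrest] at hi; simp at hi
        | some i' =>
            rw [hrest] at hi
            simp at hi
            subst hi
            rw [List.foldl_cons] at hk
            have hvs' : v ∉ PySem.Set.add s u := by
              intro h
              rcases pv_mem_add s u v h with h1 | h1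
              · exact hvs h1
              · exact huv h1.symm
            have := ih (PySem.Set.add s u) v i' k hvs' hrest hk
            simpa [List.take_succ_cons, List.foldl_cons] using this

-- writing g v at each slot v of a list, where g of the element at position j equals i + j,
-- is the sequential labelling pass
theorem pv_fold_set_eq_pvTb (l : List Int) : ∀ (perm : List Int) (i : Int) (g : Int → Int),
    (∀ (j : Nat) (h : j < l.length), g l[j] = i + j) →
    l.foldl (fun p v => PySem.List.pySetD p v (g v)) perm = pvTb perm i l := by
  induction l with
  | nil => intro perm i g _; rfl
  | cons v rest ih =>
      intro perm i g hg
      have h0 : g v = i := by simpa using hg 0 (by simp)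
      simp only [List.foldl_cons, pvTb, h0]
      apply ih
      intro j hj
      have h1 := hg (j + 1) (by simpa using Nat.succ_lt_succ hj)
      rw [List.getElem_cons_succ] at h1
      rw [h1]; push_cast; ring

-- a Nodup list indexes its own elements
theorem pv_index_nodup (l : List Int) (hnd : l.Nodup) (k : Nat) (hk : k < l.length) :
    PySem.List.index? l l[k] = some k := by
  rw [PySem.List.index?_eq_some_iff]
  refine ⟨l.take k, l.drop (k + 1), ?_, by simp [Nat.min_eq_left (Nat.le_of_lt hk)], ?_⟩
  · rw [List.getElem_cons_drop hk, List.take_append_drop]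
  · intro hmem
    obtain ⟨j, hj, hje⟩ := List.getElem_of_mem hmem
    have hjk : j < k := by
      have h2 : j < k ∧ j < l.length := by simpa using hj
      exact h2.1
    rw [List.getElem_take] at hje
    have := (List.Nodup.getElem_inj_iff hnd).1 hje
    omega

-- characterization of B: B performs the sequential labelling pass over the ordered dedup
theorem pvB_char (xs : List Int) :
    restrictedGrowthSequencePermutation_alt xs
      = PySem.List.pySetD (pvTb (List.replicate 10 (0 : Int)) 1 (PySem.Set.ofList xs)) 0 0 := by
  simp only [restrictedGrowthSequencePermutation_alt]
  congr 1
  set g : Int → Int := fun v =>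
    match PySem.List.index? xs v with
    | some i => ((PySem.Set.ofList (PySem.List.slice xs none (some ((i : Int) + 1)))).length : Int)
    | none => 0 with hg
  have hcongr : (PySem.Set.ofList xs).foldl
      (fun p v =>
        match PySem.List.index? xs v with
        | some i =>
            PySem.List.pySetD p v
              (((PySem.Set.ofList
                  (PySem.List.slice xs none (some ((i : Int) + 1)))).length : Int))
        | none => p)
      (List.replicate 10 (0 : Int))
      = (PySem.Set.ofList xs).foldl (fun p v => PySem.List.pySetD p v (g v))
          (List.replicate 10 (0 : Int)) := by
    apply PySem.List.foldl_congr_mem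
    intro p v hv
    have hvx : v ∈ xs := (PySem.Set.mem_ofList xs v).1 hv
    obtain ⟨i, hi⟩ := Option.isSome_iff_exists.1 ((PySem.List.index?_isSome_iff xs v).2 hvx)
    rw [hg]; simp only [hi]
  rw [hcongr]
  apply pv_fold_set_eq_pvTb
  intro j hj
  set v := (PySem.Set.ofList xs)[j] with hv
  have hvx : v ∈ xs := (PySem.Set.mem_ofList xs v).1 (by rw [hv]; exact List.getElem_mem hj)
  obtain ⟨i, hi⟩ := Option.isSome_iff_exists.1 ((PySem.List.index?_isSome_iff xs v).2 hvx)
  have hk : PySem.List.index? (PySem.Set.ofList xs) v = some j :=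
    pv_index_nodup _ (PySem.Set.nodup_ofList xs) j hj
  have hcount := pv_prefix_count xs [] v i j (by simp) hi
    (by rw [← PySem.Set.ofList_eq_foldl]; exact hk)
  rw [hg]
  simp only [hi]
  rw [show ((i : Int) + 1) = (((i + 1 : Nat)) : Int) from by push_cast; ring,
      PySem.List.slice_to_natCast]
  rw [PySem.Set.ofList_eq_foldl, hcount]
  push_cast; ring

-- ===== VERDICT (by name: the statement is the Claim_ definition above) =====
theorem restrictedGrowthSequencePermutation_spec : Claim_equal_restrictedGrowthSequencePermutation := by
  intro xs _ hpre
  obtain ⟨hb, hinj⟩ := hpre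
  unfold Spec_restrictedGrowthSequencePermutation
  have hbound : ∀ v ∈ xs.map (fun v => v.emod 10), 0 ≤ v ∧ v ≤ 9 := by
    intro v hv
    obtain ⟨w, _, rfl⟩ := List.mem_map.1 hv
    show (0:Int) ≤ w % 10 ∧ w % 10 ≤ 9
    omega
  have hded : PySem.Set.ofList (xs.map (fun v => v.emod 10))
      = (PySem.Set.ofList xs).map (fun v => v.emod 10) := by
    have := pv_ofList_map xs [] (by simpa using hinj)
    simpa [PySem.Set.ofList_eq_foldl] using this
  calc restrictedGrowthSequencePermutation xs
      = restrictedGrowthSequencePermutation (xs.map (fun v => v.emod 10)) := pvA_norm xs hb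
    _ = PySem.List.pySetD (pvTb (List.replicate 10 (0 : Int)) 1
          (PySem.Set.ofList (xs.map (fun v => v.emod 10)))) 0 0 :=
        pvA_char _ hbound
    _ = PySem.List.pySetD (pvTb (List.replicate 10 (0 : Int)) 1 (PySem.Set.ofList xs)) 0 0 := by
        rw [hded, pvTb_map (PySem.Set.ofList xs) _ 1 (by simp)
          (fun u hu => hb u ((PySem.Set.mem_ofList _ _).1 hu))]
    _ = restrictedGrowthSequencePermutation_alt xs := (pvB_char xs).symm
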